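-- pv_equiv track=rewrite | github.com/th3jesta/ha-lcars | py/flatten_ha_theme_css.py | read_until_top_level
-- ===== SOURCE A (Python) =====
-- from typing import Dict, List, Optional, Tuple
--
-- def read_until_top_level(text: str, start: int, stop_chars: str) -> Tuple[str, int]:
--     i = start
--     n = len(text)
--     out: List[str] = []
--     paren = 0
--     bracket = 0
--     quote: Optional[str] = None
--
--     while i < n:
--         ch = text[i]
--
--         if quote is not None:
--             out.append(ch)
--             if ch == "\\" and i + 1 < n:
--                 i += 1
--                 out.append(text[i])
--             elif ch == quote:
--                 quote = None
--             i += 1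
--             continue
--
--         if ch in ("'", '"'):
--             quote = ch
--             out.append(ch)
--             i += 1
--             continue
--
--         if ch == "/" and i + 1 < n and text[i + 1] == "*":
--             end = text.find("*/", i + 2)
--             if end == -1:
--                 out.append(text[i:])
--                 return "".join(out), n
--             out.append(text[i:end + 2])
--             i = end + 2
--             continue
--
--         if paren == 0 and bracket == 0 and ch in stop_chars:
--             break
--
--         if ch == "(":
--             paren += 1
--         elif ch == ")":
--             paren = max(0, paren - 1)
--         elif ch == "[":
--             bracket += 1
--         elif ch == "]":
--             bracket = max(0, bracket - 1)
--
--         out.append(ch)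
--         i += 1
--
--     return "".join(out), i
-- ===== SOURCE B (Python) =====
-- def _string_end(text, j, q):
--     # Index just past the closing quote q, scanning from j (just after the
--     # opening quote) with backslash-escape skipping; len(text) if unterminated.
--     n = len(text)
--     while j < n:
--         c = text[j]
--         if c == "\\" and j + 1 < n:
--             j += 2
--         elif c == q:
--             return j + 1
--         else:
--             j += 1
--     return n
--
--
-- def read_until_top_level(text, start, stop_chars):
--     n = len(text)
--     i = start
--     out = []
--     paren = 0
--     bracket = 0
--     while i < n:
--         ch = text[i]
--         if ch in "'\"":
--             k = _string_end(text, i + 1, ch)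
--             out.append(text[i:k])
--             i = k
--         elif ch == "/" and text[i + 1:i + 2] == "*":
--             end = text.find("*/", i + 2)
--             if end == -1:
--                 out.append(text[i:])
--                 return "".join(out), n
--             out.append(text[i:end + 2])
--             i = end + 2
--         elif paren == 0 and bracket == 0 and ch in stop_chars:
--             break
--         else:
--             if ch == "(":
--                 paren += 1
--             elif ch == ")":
--                 paren = max(0, paren - 1)
--             elif ch == "[":
--                 bracket += 1
--             elif ch == "]":
--                 bracket = max(0, bracket - 1)
--             out.append(ch)
--             i += 1
--     return "".join(out), i
-- ===== Notes on version B (the rewrite author's own statement) =====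
-- stated objective: simpler
-- what changed: A carries an Optional quote state through one big character loop; B drops that state entirely: a separate helper scans a whole quoted string to its closing quote and the main loop appends each string literal as one bulk slice, keeping only the depth counters.
-- outside the precondition, e.g. on read_until_top_level("/'", -2, ';'): A returns ("/'/'", 2), B returns ("/'", 2); on read_until_top_level('a;b', -5, ';'): A raises IndexError, B raises IndexError
import Mathlib
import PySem

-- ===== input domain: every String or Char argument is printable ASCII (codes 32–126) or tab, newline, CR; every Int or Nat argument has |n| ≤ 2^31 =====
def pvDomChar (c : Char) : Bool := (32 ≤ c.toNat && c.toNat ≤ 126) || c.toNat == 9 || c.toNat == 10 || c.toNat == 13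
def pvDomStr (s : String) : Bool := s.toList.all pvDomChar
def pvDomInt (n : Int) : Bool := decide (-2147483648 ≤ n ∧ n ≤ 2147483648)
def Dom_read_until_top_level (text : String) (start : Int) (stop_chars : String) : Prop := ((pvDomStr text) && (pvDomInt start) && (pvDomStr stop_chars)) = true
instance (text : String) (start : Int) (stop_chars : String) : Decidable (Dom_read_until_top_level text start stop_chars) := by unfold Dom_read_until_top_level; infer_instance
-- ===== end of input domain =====

-- B drops A's Optional quote state: a separate helper scans a whole quoted string to its
-- closing quote and the main loop appends each string literal as one bulk slice, keeping
-- only the depth counters (simpler decomposition; same cost).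

-- ===== PORT A =====
-- A's while-loop, one fuel per iteration; out is the list of appended chars ("".join at the end).
def ruLoopA (s stop : List Char) : Nat → Int → List Char → Int → Int → Option Char → List Char × Int
  | 0, i, out, _, _, _ => (out, i)
  | fuel+1, i, out, paren, bracket, quote =>
    if i < (s.length : Int) then
      match PySem.List.pyGet? s i with
      | none => (out, i)   -- IndexError (only for start < -len(text); outside Pre_)
      | some ch =>
        match quote with
        | some q =>
          if ch = '\\' ∧ i + 1 < (s.length : Int) then
            match PySem.List.pyGet? s (i + 1) with
            | none => (out ++ [ch], i + 1)   -- unreachable: i+1 is in range here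
            | some c2 => ruLoopA s stop fuel (i + 2) (out ++ [ch, c2]) paren bracket (some q)
          else if ch = q then ruLoopA s stop fuel (i + 1) (out ++ [ch]) paren bracket none
          else ruLoopA s stop fuel (i + 1) (out ++ [ch]) paren bracket (some q)
        | none =>
          if ch = '\'' ∨ ch = '"' then
            ruLoopA s stop fuel (i + 1) (out ++ [ch]) paren bracket (some ch)
          else if ch = '/' ∧ i + 1 < (s.length : Int) ∧ PySem.List.pyGet? s (i + 1) = some '*' then
            let e := PySem.Chars.findFrom s ['*', '/'] (i + 2)
            if e = -1 then (out ++ PySem.List.slice s (some i) none, (s.length : Int))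
            else ruLoopA s stop fuel (e + 2) (out ++ PySem.List.slice s (some i) (some (e + 2))) paren bracket none
          else if paren = 0 ∧ bracket = 0 ∧ ch ∈ stop then (out, i)
          else if ch = '(' then ruLoopA s stop fuel (i + 1) (out ++ [ch]) (paren + 1) bracket none
          else if ch = ')' then ruLoopA s stop fuel (i + 1) (out ++ [ch]) (max 0 (paren - 1)) bracket none
          else if ch = '[' then ruLoopA s stop fuel (i + 1) (out ++ [ch]) paren (bracket + 1) none
          else if ch = ']' then ruLoopA s stop fuel (i + 1) (out ++ [ch]) paren (max 0 (bracket - 1)) none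
          else ruLoopA s stop fuel (i + 1) (out ++ [ch]) paren bracket none
    else (out, i)

def read_until_top_level (text : String) (start : Int) (stop_chars : String) : String × Int :=
  let s := text.toList
  let r := ruLoopA s stop_chars.toList (s.length + 1 + start.natAbs) start [] 0 0 none
  (String.ofList r.1, r.2)

-- ===== PORT B =====
-- Source B's _string_end: index just past the closing quote q, scanning from j with
-- backslash-escape skipping; len(text) when unterminated. One fuel per iteration.
def ruStrEnd (s : List Char) (q : Char) : Nat → Int → Int
  | 0, _ => (s.length : Int)   -- fuel exhaustion: unreachable with the fuel given below
  | f+1, j =>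
    if j < (s.length : Int) then
      match PySem.List.pyGet? s j with
      | none => (s.length : Int)   -- unreachable for 0 ≤ j < len
      | some c =>
        if c = '\\' ∧ j + 1 < (s.length : Int) then ruStrEnd s q f (j + 2)
        else if c = q then j + 1
        else ruStrEnd s q f (j + 1)
    else (s.length : Int)

-- Source B's main while-loop: no quote state, quoted strings consumed as one slice.
def ruLoopB (s stop : List Char) : Nat → Int → List Char → Int → Int → List Char × Int
  | 0, i, out, _, _ => (out, i)
  | f+1, i, out, paren, bracket =>
    if i < (s.length : Int) then
      match PySem.List.pyGet? s i with
      | none => (out, i)   -- IndexError (outside Pre_)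
      | some ch =>
        if ch = '\'' ∨ ch = '"' then
          ruLoopB s stop f (ruStrEnd s ch (s.length + 1) (i + 1))
            (out ++ PySem.List.slice s (some i) (some (ruStrEnd s ch (s.length + 1) (i + 1)))) paren bracket
        else if ch = '/' ∧ PySem.List.slice s (some (i + 1)) (some (i + 2)) = ['*'] then
          let e := PySem.Chars.findFrom s ['*', '/'] (i + 2)
          if e = -1 then (out ++ PySem.List.slice s (some i) none, (s.length : Int))
          else ruLoopB s stop f (e + 2) (out ++ PySem.List.slice s (some i) (some (e + 2))) paren bracket
        else if paren = 0 ∧ bracket = 0 ∧ ch ∈ stop then (out, i)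
        else
          ruLoopB s stop f (i + 1) (out ++ [ch])
            (if ch = '(' then paren + 1 else if ch = ')' then max 0 (paren - 1) else paren)
            (if ch = '[' then bracket + 1 else if ch = ']' then max 0 (bracket - 1) else bracket)
    else (out, i)

def read_until_top_level_alt (text : String) (start : Int) (stop_chars : String) : String × Int :=
  let s := text.toList
  let r := ruLoopB s stop_chars.toList (s.length + 1 + start.natAbs) start [] 0 0
  (String.ofList r.1, r.2)

-- ===== PRECONDITION & SPEC =====
-- Pre_ excludes negative start positions: below -len(text) both A and B raise IndexError,
-- and in [-len(text), 0) A re-reads characters through Python's negative-index wraparound —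
-- an accident of its per-character indexing that B's bulk slicing resolves differently.
def Pre_read_until_top_level (text : String) (start : Int) (stop_chars : String) : Prop := 0 ≤ start
instance (text : String) (start : Int) (stop_chars : String) : Decidable (Pre_read_until_top_level text start stop_chars) := by unfold Pre_read_until_top_level; infer_instance
def pvWitness_read_until_top_level : String × Int × String := ("a{b;c}", 0, ";")

def Spec_read_until_top_level (text : String) (start : Int) (stop_chars : String) (out : String × Int) : Prop := out = read_until_top_level_alt text start stop_chars
instance (text : String) (start : Int) (stop_chars : String) (out : String × Int) : Decidable (Spec_read_until_top_level text start stop_chars out) := by unfold Spec_read_until_top_level; infer_instance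

-- ===== CLAIM (what is proved, stated in full; the proofs are below) =====
def Claim_equal_read_until_top_level : Prop := ∀ (text : String) (start : Int) (stop_chars : String), Dom_read_until_top_level text start stop_chars → Pre_read_until_top_level text start stop_chars → Spec_read_until_top_level text start stop_chars (read_until_top_level text start stop_chars)

-- ===== LEMMAS AND PROOFS =====

theorem ruGetInt (s : List Char) (j : Int) (h0 : 0 ≤ j) : PySem.List.pyGet? s j = s[j.toNat]? := by
  have h := PySem.List.pyGet?_natCast s j.toNat
  rw [show ((j.toNat : Nat) : Int) = j from by omega] at h
  exact h

theorem ruLoopA_exit (s stop : List Char) (f : Nat) (i : Int) (out : List Char) (p b : Int)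
    (q : Option Char) (h : (s.length : Int) ≤ i) : ruLoopA s stop f i out p b q = (out, i) := by
  cases f <;> simp [ruLoopA, not_lt.mpr h]

theorem ruLoopB_exit (s stop : List Char) (f : Nat) (i : Int) (out : List Char) (p b : Int)
    (h : (s.length : Int) ≤ i) : ruLoopB s stop f i out p b = (out, i) := by
  cases f <;> simp [ruLoopB, not_lt.mpr h]

theorem ruFindFromGe (s sub : List Char) (k : Nat) (hk : k ≤ s.length)
    (h : PySem.Chars.findFrom s sub (k : Int) ≠ -1) : (k : Int) ≤ PySem.Chars.findFrom s sub (k : Int) := by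
  rw [PySem.Chars.findFrom_natCast s sub k hk] at h ⊢
  by_cases hf : PySem.Chars.find (List.drop k s) sub = -1
  · simp [hf] at h
  · rw [if_neg hf] at h ⊢
    have := PySem.Chars.neg_one_le_find (List.drop k s) sub
    omega

theorem ruSliceNN (s : List Char) (a b : Int) (h0 : 0 ≤ a) (h1 : 0 ≤ b) :
    PySem.List.slice s (some a) (some b) = (s.drop a.toNat).take (b.toNat - a.toNat) := by
  have h := PySem.List.slice_natCast s a.toNat b.toNat
  rw [show ((a.toNat : Nat) : Int) = a from by omega,
      show ((b.toNat : Nat) : Int) = b from by omega] at h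
  exact h

theorem ruSliceNil (s : List Char) (a : Int) (h0 : 0 ≤ a) :
    PySem.List.slice s (some a) (some a) = [] := by
  rw [ruSliceNN s a a h0 h0]
  simp

theorem ruSliceSplit (s : List Char) (a b c : Int) (h0 : 0 ≤ a) (h1 : a ≤ b) (h2 : b ≤ c) :
    PySem.List.slice s (some a) (some c)
      = PySem.List.slice s (some a) (some b) ++ PySem.List.slice s (some b) (some c) := by
  rw [ruSliceNN s a c h0 (by omega), ruSliceNN s a b h0 (by omega), ruSliceNN s b c (by omega) (by omega)]
  rw [show c.toNat - a.toNat = (b.toNat - a.toNat) + (c.toNat - b.toNat) from by omega]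
  rw [List.take_add, List.drop_drop]
  rw [show a.toNat + (b.toNat - a.toNat) = b.toNat from by omega]

theorem ruSliceOne (s : List Char) (a : Int) (ch : Char) (h0 : 0 ≤ a) (h : s[a.toNat]? = some ch) :
    PySem.List.slice s (some a) (some (a + 1)) = [ch] := by
  rw [ruSliceNN s a (a + 1) h0 (by omega)]
  rw [show (a + 1).toNat - a.toNat = 1 from by omega]
  rw [List.take_one, List.head?_drop, h]
  rfl

theorem ruSliceOne' (s : List Char) (a b : Int) (ch : Char) (h0 : 0 ≤ a) (hb : b = a + 1)
    (h : s[a.toNat]? = some ch) : PySem.List.slice s (some a) (some b) = [ch] := by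
  rw [hb]
  exact ruSliceOne s a ch h0 h

theorem ruStar (s : List Char) (i : Int) (h0 : 0 ≤ i) :
    (PySem.List.slice s (some (i + 1)) (some (i + 2)) = ['*'])
      ↔ (i + 1 < (s.length : Int) ∧ PySem.List.pyGet? s (i + 1) = some '*') := by
  rw [ruSliceNN s (i + 1) (i + 2) (by omega) (by omega)]
  rw [show (i + 2).toNat - (i + 1).toNat = 1 from by omega]
  rw [List.take_one, List.head?_drop, ruGetInt s (i + 1) (by omega)]
  cases hx : s[(i + 1).toNat]? with
  | none => simp
  | some c =>
    obtain ⟨hlt, -⟩ := List.getElem?_eq_some_iff.mp hx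
    simp only [Option.toList_some]
    constructor
    · intro h
      have hc : c = '*' := by simpa using h
      exact ⟨by omega, by rw [hc]⟩
    · rintro ⟨-, h⟩
      have hc : c = '*' := by injection h
      rw [hc]

-- one-step unfolding lemmas (targeted rewriting of one specific application)
theorem ruStepE (s : List Char) (q : Char) (f : Nat) (j : Int) (c : Char)
    (hin : j < (s.length : Int)) (hpg : PySem.List.pyGet? s j = some c) :
    ruStrEnd s q (f + 1) j
      = if c = '\\' ∧ j + 1 < (s.length : Int) then ruStrEnd s q f (j + 2)
        else if c = q then j + 1 else ruStrEnd s q f (j + 1) := by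
  simp only [ruStrEnd]
  rw [if_pos hin, hpg]

theorem ruStepA_quote (s stop : List Char) (f : Nat) (i : Int) (out : List Char) (p b : Int)
    (q ch : Char) (hin : i < (s.length : Int)) (hpg : PySem.List.pyGet? s i = some ch) :
    ruLoopA s stop (f + 1) i out p b (some q)
      = if ch = '\\' ∧ i + 1 < (s.length : Int) then
          (match PySem.List.pyGet? s (i + 1) with
           | none => (out ++ [ch], i + 1)
           | some c2 => ruLoopA s stop f (i + 2) (out ++ [ch, c2]) p b (some q))
        else if ch = q then ruLoopA s stop f (i + 1) (out ++ [ch]) p b none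
        else ruLoopA s stop f (i + 1) (out ++ [ch]) p b (some q) := by
  simp only [ruLoopA]
  rw [if_pos hin, hpg]

theorem ruStepA_none (s stop : List Char) (f : Nat) (i : Int) (out : List Char) (p b : Int)
    (ch : Char) (hin : i < (s.length : Int)) (hpg : PySem.List.pyGet? s i = some ch) :
    ruLoopA s stop (f + 1) i out p b none
      = if ch = '\'' ∨ ch = '"' then ruLoopA s stop f (i + 1) (out ++ [ch]) p b (some ch)
        else if ch = '/' ∧ i + 1 < (s.length : Int) ∧ PySem.List.pyGet? s (i + 1) = some '*' then
          (if PySem.Chars.findFrom s ['*', '/'] (i + 2) = -1 then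
            (out ++ PySem.List.slice s (some i) none, (s.length : Int))
          else ruLoopA s stop f (PySem.Chars.findFrom s ['*', '/'] (i + 2) + 2)
            (out ++ PySem.List.slice s (some i) (some (PySem.Chars.findFrom s ['*', '/'] (i + 2) + 2))) p b none)
        else if p = 0 ∧ b = 0 ∧ ch ∈ stop then (out, i)
        else if ch = '(' then ruLoopA s stop f (i + 1) (out ++ [ch]) (p + 1) b none
        else if ch = ')' then ruLoopA s stop f (i + 1) (out ++ [ch]) (max 0 (p - 1)) b none
        else if ch = '[' then ruLoopA s stop f (i + 1) (out ++ [ch]) p (b + 1) none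
        else if ch = ']' then ruLoopA s stop f (i + 1) (out ++ [ch]) p (max 0 (b - 1)) none
        else ruLoopA s stop f (i + 1) (out ++ [ch]) p b none := by
  simp only [ruLoopA]
  rw [if_pos hin, hpg]

theorem ruStepB (s stop : List Char) (f : Nat) (i : Int) (out : List Char) (p b : Int)
    (ch : Char) (hin : i < (s.length : Int)) (hpg : PySem.List.pyGet? s i = some ch) :
    ruLoopB s stop (f + 1) i out p b
      = if ch = '\'' ∨ ch = '"' then
          ruLoopB s stop f (ruStrEnd s ch (s.length + 1) (i + 1))
            (out ++ PySem.List.slice s (some i) (some (ruStrEnd s ch (s.length + 1) (i + 1)))) p b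
        else if ch = '/' ∧ PySem.List.slice s (some (i + 1)) (some (i + 2)) = ['*'] then
          (if PySem.Chars.findFrom s ['*', '/'] (i + 2) = -1 then
            (out ++ PySem.List.slice s (some i) none, (s.length : Int))
          else ruLoopB s stop f (PySem.Chars.findFrom s ['*', '/'] (i + 2) + 2)
            (out ++ PySem.List.slice s (some i) (some (PySem.Chars.findFrom s ['*', '/'] (i + 2) + 2))) p b)
        else if p = 0 ∧ b = 0 ∧ ch ∈ stop then (out, i)
        else ruLoopB s stop f (i + 1) (out ++ [ch])
          (if ch = '(' then p + 1 else if ch = ')' then max 0 (p - 1) else p)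
          (if ch = '[' then b + 1 else if ch = ']' then max 0 (b - 1) else b) := by
  simp only [ruLoopB]
  rw [if_pos hin, hpg]

theorem ruStrEnd_bounds (s : List Char) (q : Char) : ∀ (f : Nat) (j : Int),
    0 ≤ j → j ≤ (s.length : Int) → (s.length : Int) ≤ j + f →
    j ≤ ruStrEnd s q f j ∧ ruStrEnd s q f j ≤ (s.length : Int) := by
  intro f
  induction f with
  | zero => intro j h0 h1 h2; simp only [ruStrEnd]; omega
  | succ f ih =>
    intro j h0 h1 h2
    by_cases hin : j < (s.length : Int)
    · have hlt : j.toNat < s.length := by omega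
      have hpg : PySem.List.pyGet? s j = some s[j.toNat] := by
        rw [ruGetInt s j h0]; exact List.getElem?_eq_getElem hlt
      rw [ruStepE s q f j s[j.toNat] hin hpg]
      by_cases hA : s[j.toNat] = '\\' ∧ j + 1 < (s.length : Int)
      · rw [if_pos hA]
        have := ih (j + 2) (by omega) (by omega) (by omega)
        omega
      · rw [if_neg hA]
        by_cases hB : s[j.toNat] = q
        · rw [if_pos hB]; omega
        · rw [if_neg hB]
          have := ih (j + 1) (by omega) (by omega) (by omega)
          omega
    · simp only [ruStrEnd]
      rw [if_neg hin]
      omega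

theorem ruStrEnd_fuel (s : List Char) (q : Char) : ∀ (f1 f2 : Nat) (j : Int),
    0 ≤ j → (s.length : Int) ≤ j + f1 → (s.length : Int) ≤ j + f2 →
    ruStrEnd s q f1 j = ruStrEnd s q f2 j := by
  intro f1
  induction f1 with
  | zero =>
    intro f2 j h0 h1 h2
    have hge : ¬ j < (s.length : Int) := by omega
    cases f2 <;> simp [ruStrEnd, hge]
  | succ f1 ih =>
    intro f2 j h0 h1 h2
    by_cases hin : j < (s.length : Int)
    · obtain ⟨g, rfl⟩ : ∃ g, f2 = g + 1 := ⟨f2 - 1, by omega⟩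
      have hlt : j.toNat < s.length := by omega
      have hpg : PySem.List.pyGet? s j = some s[j.toNat] := by
        rw [ruGetInt s j h0]; exact List.getElem?_eq_getElem hlt
      rw [ruStepE s q f1 j s[j.toNat] hin hpg, ruStepE s q g j s[j.toNat] hin hpg]
      by_cases hA : s[j.toNat] = '\\' ∧ j + 1 < (s.length : Int)
      · rw [if_pos hA, if_pos hA]
        exact ih g (j + 2) (by omega) (by omega) (by omega)
      · rw [if_neg hA, if_neg hA]
        by_cases hB : s[j.toNat] = q
        · rw [if_pos hB, if_pos hB]
        · rw [if_neg hB, if_neg hB]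
          exact ih g (j + 1) (by omega) (by omega) (by omega)
    · cases f2 <;> simp [ruStrEnd, hin]

theorem ruLoopA_fuel (s stop : List Char) : ∀ (f1 f2 : Nat) (i : Int) (out : List Char)
    (p b : Int) (q : Option Char),
    0 ≤ i → (s.length : Int) ≤ i + f1 → (s.length : Int) ≤ i + f2 →
    ruLoopA s stop f1 i out p b q = ruLoopA s stop f2 i out p b q := by
  intro f1
  induction f1 with
  | zero =>
    intro f2 i out p b q h0 h1 h2
    rw [ruLoopA_exit s stop _ _ _ _ _ _ (by omega), ruLoopA_exit s stop _ _ _ _ _ _ (by omega)]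
  | succ f1 ih =>
    intro f2 i out p b q h0 h1 h2
    by_cases hin : i < (s.length : Int)
    case neg =>
      rw [ruLoopA_exit s stop _ _ _ _ _ _ (by omega), ruLoopA_exit s stop _ _ _ _ _ _ (by omega)]
    case pos =>
    obtain ⟨g, rfl⟩ : ∃ g, f2 = g + 1 := ⟨f2 - 1, by omega⟩
    have hlt : i.toNat < s.length := by omega
    have hpg : PySem.List.pyGet? s i = some s[i.toNat] := by
      rw [ruGetInt s i h0]; exact List.getElem?_eq_getElem hlt
    set ch := s[i.toNat] with hchdef
    cases q with
    | some qc =>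
      rw [ruStepA_quote s stop f1 i out p b qc ch hin hpg,
          ruStepA_quote s stop g i out p b qc ch hin hpg]
      by_cases hA : ch = '\\' ∧ i + 1 < (s.length : Int)
      · rw [if_pos hA, if_pos hA]
        have hlt2 : (i + 1).toNat < s.length := by omega
        have hpg2 : PySem.List.pyGet? s (i + 1) = some s[(i + 1).toNat] := by
          rw [ruGetInt s (i + 1) (by omega)]; exact List.getElem?_eq_getElem hlt2
        rw [hpg2]
        dsimp only
        exact ih g (i + 2) _ p b _ (by omega) (by omega) (by omega)
      · rw [if_neg hA, if_neg hA]
        by_cases hB : ch = qc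
        · rw [if_pos hB, if_pos hB]
          exact ih g (i + 1) _ p b _ (by omega) (by omega) (by omega)
        · rw [if_neg hB, if_neg hB]
          exact ih g (i + 1) _ p b _ (by omega) (by omega) (by omega)
    | none =>
      rw [ruStepA_none s stop f1 i out p b ch hin hpg,
          ruStepA_none s stop g i out p b ch hin hpg]
      by_cases h1q : ch = '\'' ∨ ch = '"'
      · rw [if_pos h1q, if_pos h1q]
        exact ih g (i + 1) _ p b _ (by omega) (by omega) (by omega)
      · rw [if_neg h1q, if_neg h1q]
        by_cases h2c : ch = '/' ∧ i + 1 < (s.length : Int) ∧ PySem.List.pyGet? s (i + 1) = some '*'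
        · rw [if_pos h2c, if_pos h2c]
          by_cases h3 : PySem.Chars.findFrom s ['*', '/'] (i + 2) = -1
          · rw [if_pos h3, if_pos h3]
          · rw [if_neg h3, if_neg h3]
            have hi2 : ((i + 2).toNat : Int) = i + 2 := by omega
            have he : i + 2 ≤ PySem.Chars.findFrom s ['*', '/'] (i + 2) := by
              have := ruFindFromGe s ['*', '/'] (i + 2).toNat (by omega) (by rw [hi2]; exact h3)
              rw [hi2] at this
              exact this
            exact ih g _ _ p b _ (by omega) (by omega) (by omega)
        · rw [if_neg h2c, if_neg h2c]
          by_cases h3s : p = 0 ∧ b = 0 ∧ ch ∈ stop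
          · rw [if_pos h3s, if_pos h3s]
          · rw [if_neg h3s, if_neg h3s]
            have hrec : ∀ (p' b' : Int),
                ruLoopA s stop f1 (i + 1) (out ++ [ch]) p' b' none
                  = ruLoopA s stop g (i + 1) (out ++ [ch]) p' b' none :=
              fun p' b' => ih g (i + 1) _ p' b' none (by omega) (by omega) (by omega)
            by_cases h4 : ch = '('
            · rw [if_pos h4, if_pos h4]; exact hrec _ _
            · rw [if_neg h4, if_neg h4]
              by_cases h5 : ch = ')'
              · rw [if_pos h5, if_pos h5]; exact hrec _ _
              · rw [if_neg h5, if_neg h5]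
                by_cases h6 : ch = '['
                · rw [if_pos h6, if_pos h6]; exact hrec _ _
                · rw [if_neg h6, if_neg h6]
                  by_cases h7 : ch = ']'
                  · rw [if_pos h7, if_pos h7]; exact hrec _ _
                  · rw [if_neg h7, if_neg h7]; exact hrec _ _

-- A's quote-mode scan from j equals: jump to ruStrEnd, append the whole span verbatim,
-- continue with quote = none.
theorem ruQuoteA (s stop : List Char) (q : Char) : ∀ (f : Nat) (j : Int) (out : List Char) (p b : Int),
    0 ≤ j → j ≤ (s.length : Int) → (s.length : Int) ≤ j + f →
    ruLoopA s stop f j out p b (some q)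
      = ruLoopA s stop f (ruStrEnd s q f j)
          (out ++ PySem.List.slice s (some j) (some (ruStrEnd s q f j))) p b none := by
  intro f
  induction f with
  | zero =>
    intro j out p b h0 h1 h2
    have hj : j = (s.length : Int) := by omega
    simp only [ruStrEnd, ruLoopA]
    rw [hj, ruSliceNil s _ (by omega)]
    simp
  | succ f ih =>
    intro j out p b h0 h1 h2
    by_cases hin : j < (s.length : Int)
    case neg =>
      have hj : j = (s.length : Int) := by omega
      have hse : ruStrEnd s q (f + 1) j = (s.length : Int) := by
        simp only [ruStrEnd]; rw [if_neg hin]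
      rw [hse, ruLoopA_exit s stop _ _ _ _ _ _ (by omega),
          ruLoopA_exit s stop _ _ _ _ _ _ (by omega), hj, ruSliceNil s _ (by omega)]
      simp
    case pos =>
    have hlt : j.toNat < s.length := by omega
    have hpg : PySem.List.pyGet? s j = some s[j.toNat] := by
      rw [ruGetInt s j h0]; exact List.getElem?_eq_getElem hlt
    set ch := s[j.toNat] with hchdef
    rw [ruStepA_quote s stop f j out p b q ch hin hpg, ruStepE s q f j ch hin hpg]
    by_cases hA : ch = '\\' ∧ j + 1 < (s.length : Int)
    · rw [if_pos hA, if_pos hA]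
      have hlt2 : (j + 1).toNat < s.length := by omega
      have hpg2 : PySem.List.pyGet? s (j + 1) = some s[(j + 1).toNat] := by
        rw [ruGetInt s (j + 1) (by omega)]; exact List.getElem?_eq_getElem hlt2
      rw [hpg2]
      dsimp only
      set k := ruStrEnd s q f (j + 2) with hkdef
      obtain ⟨hk1, hk2⟩ := ruStrEnd_bounds s q f (j + 2) (by omega) (by omega) (by omega)
      rw [ih (j + 2) (out ++ [ch, s[(j + 1).toNat]]) p b (by omega) (by omega) (by omega)]
      rw [← hkdef]
      rw [ruLoopA_fuel s stop f (f + 1) k _ p b none (by omega) (by omega) (by omega)]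
      congr 1
      rw [ruSliceSplit s j (j + 2) k h0 (by omega) (by omega),
          ruSliceSplit s j (j + 1) (j + 2) h0 (by omega) (by omega),
          ruSliceOne s j ch h0 (by rw [hchdef]; exact List.getElem?_eq_getElem hlt),
          ruSliceOne' s (j + 1) (j + 2) s[(j + 1).toNat] (by omega) (by ring)
            (List.getElem?_eq_getElem hlt2)]
      simp
    · rw [if_neg hA, if_neg hA]
      by_cases hB : ch = q
      · rw [if_pos hB, if_pos hB]
        rw [ruLoopA_fuel s stop f (f + 1) (j + 1) _ p b none (by omega) (by omega) (by omega)]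
        congr 1
        rw [ruSliceOne s j ch h0 (by rw [hchdef]; exact List.getElem?_eq_getElem hlt)]
      · rw [if_neg hB, if_neg hB]
        set k := ruStrEnd s q f (j + 1) with hkdef
        obtain ⟨hk1, hk2⟩ := ruStrEnd_bounds s q f (j + 1) (by omega) (by omega) (by omega)
        rw [ih (j + 1) (out ++ [ch]) p b (by omega) (by omega) (by omega)]
        rw [← hkdef]
        rw [ruLoopA_fuel s stop f (f + 1) k _ p b none (by omega) (by omega) (by omega)]
        congr 1
        rw [ruSliceSplit s j (j + 1) k h0 (by omega) (by omega),
            ruSliceOne s j ch h0 (by rw [hchdef]; exact List.getElem?_eq_getElem hlt)]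
        simp

theorem ruMain (s stop : List Char) : ∀ (fB fA : Nat) (i : Int) (out : List Char) (p b : Int),
    0 ≤ i → (s.length : Int) ≤ i + fA → (s.length : Int) ≤ i + fB →
    ruLoopA s stop fA i out p b none = ruLoopB s stop fB i out p b := by
  intro fB
  induction fB with
  | zero =>
    intro fA i out p b h0 hfa hfb
    rw [ruLoopA_exit s stop _ _ _ _ _ _ (by omega), ruLoopB_exit s stop _ _ _ _ _ (by omega)]
  | succ fB ih =>
    intro fA i out p b h0 hfa hfb
    by_cases hin : i < (s.length : Int)
    case neg =>
      rw [ruLoopA_exit s stop _ _ _ _ _ _ (by omega), ruLoopB_exit s stop _ _ _ _ _ (by omega)]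
    case pos =>
    obtain ⟨g, rfl⟩ : ∃ g, fA = g + 1 := ⟨fA - 1, by omega⟩
    have hlt : i.toNat < s.length := by omega
    have hpg : PySem.List.pyGet? s i = some s[i.toNat] := by
      rw [ruGetInt s i h0]; exact List.getElem?_eq_getElem hlt
    set ch := s[i.toNat] with hchdef
    rw [ruStepA_none s stop g i out p b ch hin hpg, ruStepB s stop fB i out p b ch hin hpg]
    by_cases h1q : ch = '\'' ∨ ch = '"'
    · rw [if_pos h1q, if_pos h1q]
      set k := ruStrEnd s ch (s.length + 1) (i + 1) with hkdef
      obtain ⟨hk1, hk2⟩ := ruStrEnd_bounds s ch (s.length + 1) (i + 1) (by omega) (by omega) (by omega)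
      rw [ruQuoteA s stop ch g (i + 1) (out ++ [ch]) p b (by omega) (by omega) (by omega)]
      rw [ruStrEnd_fuel s ch g (s.length + 1) (i + 1) (by omega) (by omega) (by omega), ← hkdef]
      rw [show (out ++ [ch]) ++ PySem.List.slice s (some (i + 1)) (some k)
            = out ++ PySem.List.slice s (some i) (some k) from by
        rw [ruSliceSplit s i (i + 1) k h0 (by omega) (by omega),
            ruSliceOne s i ch h0 (by rw [hchdef]; exact List.getElem?_eq_getElem hlt)]
        simp]
      rw [ruLoopA_fuel s stop g (g + 1) k _ p b none (by omega) (by omega) (by omega)]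
      exact ih (g + 1) k _ p b (by omega) (by omega) (by omega)
    · rw [if_neg h1q, if_neg h1q]
      by_cases h2c : ch = '/' ∧ i + 1 < (s.length : Int) ∧ PySem.List.pyGet? s (i + 1) = some '*'
      · rw [if_pos h2c]
        rw [if_pos (show ch = '/' ∧ PySem.List.slice s (some (i + 1)) (some (i + 2)) = ['*'] from
              ⟨h2c.1, (ruStar s i h0).mpr h2c.2⟩)]
        by_cases h3 : PySem.Chars.findFrom s ['*', '/'] (i + 2) = -1
        · rw [if_pos h3, if_pos h3]
        · rw [if_neg h3, if_neg h3]
          have hi2 : ((i + 2).toNat : Int) = i + 2 := by omega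
          have he : i + 2 ≤ PySem.Chars.findFrom s ['*', '/'] (i + 2) := by
            have := ruFindFromGe s ['*', '/'] (i + 2).toNat (by omega) (by rw [hi2]; exact h3)
            rw [hi2] at this
            exact this
          exact ih g _ _ p b (by omega) (by omega) (by omega)
      · rw [if_neg h2c]
        rw [if_neg (show ¬ (ch = '/' ∧ PySem.List.slice s (some (i + 1)) (some (i + 2)) = ['*']) from by
              rintro ⟨hsl, hst⟩
              exact h2c ⟨hsl, (ruStar s i h0).mp hst⟩)]
        by_cases h3s : p = 0 ∧ b = 0 ∧ ch ∈ stop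
        · rw [if_pos h3s, if_pos h3s]
        · rw [if_neg h3s, if_neg h3s]
          by_cases h4 : ch = '('
          · rw [if_pos h4, if_pos h4, if_neg (by rw [h4]; decide : ¬ ch = '[')]
            rw [if_neg (show ¬ ch = ']' from by rw [h4]; decide)]
            exact ih g (i + 1) _ _ _ (by omega) (by omega) (by omega)
          · rw [if_neg h4, if_neg h4]
            by_cases h5 : ch = ')'
            · rw [if_pos h5, if_pos h5, if_neg (show ¬ ch = '[' from by rw [h5]; decide)]
              rw [if_neg (show ¬ ch = ']' from by rw [h5]; decide)]
              exact ih g (i + 1) _ _ _ (by omega) (by omega) (by omega)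
            · rw [if_neg h5, if_neg h5]
              by_cases h6 : ch = '['
              · rw [if_pos h6, if_pos h6]
                exact ih g (i + 1) _ _ _ (by omega) (by omega) (by omega)
              · rw [if_neg h6, if_neg h6]
                by_cases h7 : ch = ']'
                · rw [if_pos h7, if_pos h7]
                  exact ih g (i + 1) _ _ _ (by omega) (by omega) (by omega)
                · rw [if_neg h7, if_neg h7]
                  exact ih g (i + 1) _ _ _ (by omega) (by omega) (by omega)

-- ===== VERDICT (by name: the statement is the Claim_ definition above) =====
theorem read_until_top_level_spec : Claim_equal_read_until_top_level := by
  intro text start stop_chars _hDom hPre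
  unfold Spec_read_until_top_level read_until_top_level read_until_top_level_alt
  have h := ruMain (text.toList) (stop_chars.toList)
    (text.toList.length + 1 + start.natAbs) (text.toList.length + 1 + start.natAbs)
    start [] 0 0 hPre (by omega) (by omega)
  simp only at h ⊢
  rw [h]
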